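-- pv_equiv track=rewrite | github.com/AnnemetteBP/brainsurgery | brainsurgery/synapse/axon/parser.py | _split_top_level_csv
-- ===== SOURCE A (Python) =====
-- def _split_top_level_csv(text: str) -> list[str]:
--     parts: list[str] = []
--     depth = 0
--     start = 0
--     for idx, ch in enumerate(text):
--         if ch in "([":
--             depth += 1
--         elif ch in ")]":
--             depth -= 1
--         elif ch == "," and depth == 0:
--             parts.append(text[start:idx].strip())
--             start = idx + 1
--     tail = text[start:].strip()
--     if tail:
--         parts.append(tail)
--     return parts
-- ===== SOURCE B (Python) =====
-- def _split_top_level_csv(text: str) -> list[str]: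
--     segs: list[str] = []
--     pending: list[str] = []
--     depth = 0
--     for piece in text.split(","):
--         pending.append(piece)
--         depth += piece.count("(") + piece.count("[") - piece.count(")") - piece.count("]")
--         if depth == 0:
--             segs.append(",".join(pending).strip())
--             pending = []
--     if pending:
--         segs.append(",".join(pending).strip())
--     return segs if segs[-1] else segs[:-1]
-- ===== Notes on version B (the rewrite author's own statement) =====
-- stated objective: faster
-- what changed: B replaces A's per-character depth-tracking scan with a split-and-merge algorithm: split the text on every comma with str.split, compute each piece's bracket balance from four str.count calls, and merge consecutive pieces back with a join while the running balance is nonzero, emitting a stripped segment each time the balance returns to zero.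
import Mathlib
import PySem

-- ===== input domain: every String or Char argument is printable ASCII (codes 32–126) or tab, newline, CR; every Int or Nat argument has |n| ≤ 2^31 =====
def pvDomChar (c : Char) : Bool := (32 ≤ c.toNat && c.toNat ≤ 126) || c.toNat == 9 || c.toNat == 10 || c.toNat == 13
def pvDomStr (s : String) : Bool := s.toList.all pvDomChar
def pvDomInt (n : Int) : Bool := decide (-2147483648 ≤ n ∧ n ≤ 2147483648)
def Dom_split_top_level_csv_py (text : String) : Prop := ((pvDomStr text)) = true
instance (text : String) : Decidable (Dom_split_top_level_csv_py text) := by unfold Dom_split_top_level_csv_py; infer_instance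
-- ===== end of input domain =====

-- B replaces A's per-character depth scan by split-on-every-comma (str.split) + merging
-- pieces back by their bracket counts while the running balance is nonzero;
-- objective: faster (C-level split/count instead of a per-character Python loop).

-- ===== PORT A =====
-- loop over enumerate(text); 'ch in "(["' ported as the equivalent two-way equality test
def pvLoopA (text : String) : List (Int × Char) → List String × Int × Int → List String × Int × Int
  | [], st => st
  | (idx, ch) :: rest, (parts, depth, start) =>
    if ch = '(' ∨ ch = '[' then pvLoopA text rest (parts, depth + 1, start)
    else if ch = ')' ∨ ch = ']' then pvLoopA text rest (parts, depth - 1, start)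
    else if ch = ',' ∧ depth = 0 then
      pvLoopA text rest
        (parts ++ [PySem.Str.strip (PySem.Str.slice text (some start) (some idx))], depth, idx + 1)
    else pvLoopA text rest (parts, depth, start)

def split_top_level_csv_py (text : String) : List String :=
  let st := pvLoopA text (PySem.List.enumerate text.toList) ([], 0, 0)
  let tail := PySem.Str.strip (PySem.Str.slice text (some st.2.2) none)
  if tail ≠ "" then st.1 ++ [tail] else st.1

-- ===== PORT B =====
-- piece.count("(") + piece.count("[") - piece.count(")") - piece.count("]")
def pvBal (piece : String) : Int :=
  (PySem.Str.count piece "(" : Int) + (PySem.Str.count piece "[" : Int)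
    - (PySem.Str.count piece ")" : Int) - (PySem.Str.count piece "]" : Int)

-- the for-loop of Source B over the pieces of text.split(","), state (segs, pending, depth)
def pvPieces : List String → List String × List String × Int → List String × List String × Int
  | [], st => st
  | piece :: rest, (segs, pending, depth) =>
    let pending' := pending ++ [piece]
    let depth' := depth + pvBal piece
    if depth' = 0 then
      pvPieces rest (segs ++ [PySem.Str.strip (PySem.Str.join "," pending')], [], depth')
    else pvPieces rest (segs, pending', depth')

def split_top_level_csv_py_alt (text : String) : List String :=
  -- text.split(","): the separator is the nonempty literal ",", so split? is always `some`
  let pieces := (PySem.Str.split? text ",").getD []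
  let st := pvPieces pieces ([], [], 0)
  let segs := if st.2.1 ≠ [] then st.1 ++ [PySem.Str.strip (PySem.Str.join "," st.2.1)] else st.1
  -- segs is never empty (split(",") yields at least one piece), so Python's segs[-1] /
  -- segs[:-1] are ported as getLastD "" / dropLast (exact here)
  if segs.getLastD "" ≠ "" then segs else segs.dropLast

-- ===== PRECONDITION & SPEC =====
def Spec_split_top_level_csv_py (text : String) (out : List String) : Prop := out = split_top_level_csv_py_alt text
instance (text : String) (out : List String) : Decidable (Spec_split_top_level_csv_py text out) := by unfold Spec_split_top_level_csv_py; infer_instance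

-- ===== CLAIM (what is proved, stated in full; the proofs are below) =====
def Claim_equal_split_top_level_csv_py : Prop := ∀ (text : String), Dom_split_top_level_csv_py text → Spec_split_top_level_csv_py text (split_top_level_csv_py text)

-- ===== LEMMAS AND PROOFS =====

/-- Reference: (completed raw top-level segments, raw tail segment) of a char list,
    starting at depth `d` with the current segment's chars so far in `cur`. -/
def pvSegsC : List Char → Int → List Char → List (List Char) × List Char
  | [], _, cur => ([], cur)
  | ch :: rest, d, cur =>
    if ch = '(' ∨ ch = '[' then pvSegsC rest (d + 1) (cur ++ [ch])
    else if ch = ')' ∨ ch = ']' then pvSegsC rest (d - 1) (cur ++ [ch])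
    else if ch = ',' ∧ d = 0 then
      let r := pvSegsC rest 0 []
      (cur :: r.1, r.2)
    else pvSegsC rest d (cur ++ [ch])

/-- strip, as a String-valued function of a raw char segment. -/
def pvF (seg : List Char) : String := PySem.Str.strip (String.ofList seg)

/-- Split a char list at every comma. -/
def pvSplitC : List Char → List (List Char)
  | [] => [[]]
  | ch :: rest =>
    if ch = ',' then [] :: pvSplitC rest
    else match pvSplitC rest with
      | [] => [[ch]]
      | h :: t => (ch :: h) :: t

/-- Join char-list pieces with commas. -/
def pvJoinC : List (List Char) → List Char
  | [] => []
  | [p] => p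
  | p :: q :: t => p ++ ',' :: pvJoinC (q :: t)

/-- Recursive bracket balance of a char list. -/
def pvBalC : List Char → Int
  | [] => 0
  | ch :: rest =>
    (if ch = '(' ∨ ch = '[' then 1 else if ch = ')' ∨ ch = ']' then -1 else 0) + pvBalC rest

/-- Head-extension of the first piece (shape of splitOn.go's result). -/
def pvConsH (pre : List Char) : List (List Char) → List (List Char)
  | [] => [pre]
  | h :: t => (pre ++ h) :: t

/-- The final `if pending:` / truthiness steps of Source B, as a function of the loop state. -/
def pvFinB (st : List String × List String × Int) : List String :=
  if st.2.1 ≠ [] then st.1 ++ [PySem.Str.strip (PySem.Str.join "," st.2.1)] else st.1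

theorem pvSplitC_ne_nil (l : List Char) : pvSplitC l ≠ [] := by
  cases l with
  | nil => simp [pvSplitC]
  | cons c rest =>
    simp only [pvSplitC]
    split_ifs
    · simp
    · cases h : pvSplitC rest <;> simp

theorem pvSplitC_no_comma (l : List Char) : ∀ p ∈ pvSplitC l, ',' ∉ p := by
  induction l with
  | nil => simp [pvSplitC]
  | cons c rest ih =>
    simp only [pvSplitC]
    split_ifs with hc
    · intro p hp
      rcases List.mem_cons.1 hp with rfl | hp
      · simp
      · exact ih p hp
    · cases h : pvSplitC rest with
      | nil => exact absurd h (pvSplitC_ne_nil rest)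
      | cons q t =>
        intro p hp
        rcases List.mem_cons.1 hp with rfl | hp
        · intro hm
          rcases List.mem_cons.1 hm with rfl | hm
          · exact hc rfl
          · exact ih q (h ▸ List.mem_cons_self ..) hm
        · exact ih p (h ▸ List.mem_cons_of_mem _ hp)

theorem pvJoinC_cons (p : List Char) (r : List (List Char)) (hr : r ≠ []) :
    pvJoinC (p :: r) = p ++ ',' :: pvJoinC r := by
  cases r with
  | nil => exact absurd rfl hr
  | cons q t => rfl

theorem pvJoinC_splitC (l : List Char) : pvJoinC (pvSplitC l) = l := by
  induction l with
  | nil => simp [pvSplitC, pvJoinC]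
  | cons c rest ih =>
    simp only [pvSplitC]
    split_ifs with hc
    · rw [pvJoinC_cons _ _ (pvSplitC_ne_nil rest), ih]
      simp [hc]
    · cases h : pvSplitC rest with
      | nil => exact absurd h (pvSplitC_ne_nil rest)
      | cons q t =>
        rw [h] at ih
        cases t with
        | nil => simp [pvJoinC] at ih ⊢; exact ih
        | cons q' t' =>
          rw [pvJoinC_cons _ _ (by simp)]
          simpa using ih

theorem intercalate_comma (ps : List (List Char)) :
    List.intercalate [','] ps = pvJoinC ps := by
  match ps with
  | [] => rfl
  | [p] => simp [pvJoinC, List.intercalate]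
  | p :: q :: t =>
    rw [pvJoinC_cons _ _ (by simp), ← intercalate_comma (q :: t)]
    rfl

theorem splitOn_go_comma : ∀ (fuel : Nat), ∀ (l cur : List Char) (acc : List (List Char)),
    l.length < fuel →
    PySem.Chars.splitOn.go [','] fuel l cur acc
      = acc.reverse ++ pvConsH cur.reverse (pvSplitC l) := by
  intro fuel
  induction fuel with
  | zero => intro l cur acc h; omega
  | succ fuel ih =>
    intro l cur acc h
    cases l with
    | nil => simp [PySem.Chars.splitOn.go, pvSplitC, pvConsH]
    | cons c rest =>
      by_cases hc : c = ','
      · subst hc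
        rw [show PySem.Chars.splitOn.go [','] (fuel+1) (',' :: rest) cur acc
              = PySem.Chars.splitOn.go [','] fuel rest [] (cur.reverse :: acc) from by
            simp [PySem.Chars.splitOn.go, List.isPrefixOf]]
        rw [ih rest [] _ (by simpa using h)]
        simp only [pvSplitC]
        cases hs : pvSplitC rest with
        | nil => exact absurd hs (pvSplitC_ne_nil rest)
        | cons q t => simp [pvConsH]
      · rw [show PySem.Chars.splitOn.go [','] (fuel+1) (c :: rest) cur acc
              = PySem.Chars.splitOn.go [','] fuel rest (c :: cur) acc from by
            simp [PySem.Chars.splitOn.go, List.isPrefixOf]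
            intro hh; exact absurd hh.symm hc]
        rw [ih rest (c :: cur) _ (by simpa using h)]
        simp only [pvSplitC, if_neg hc]
        cases hs : pvSplitC rest with
        | nil => exact absurd hs (pvSplitC_ne_nil rest)
        | cons q t => simp [pvConsH]

theorem splitOn_comma (l : List Char) : PySem.Chars.splitOn l [','] = pvSplitC l := by
  have h := splitOn_go_comma (l.length + 1) l [] [] (by omega)
  rw [PySem.Chars.splitOn] at *
  rw [h]
  cases hs : pvSplitC l with
  | nil => exact absurd hs (pvSplitC_ne_nil l)
  | cons q t => simp [pvConsH]

theorem count_go_char (c : Char) : ∀ (fuel : Nat), ∀ (l : List Char) (acc : Nat),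
    l.length ≤ fuel →
    PySem.Chars.count.go [c] fuel l acc = acc + l.count c := by
  intro fuel
  induction fuel with
  | zero =>
    intro l acc h
    rw [List.length_eq_zero_iff.1 (Nat.le_zero.1 h)]
    simp [PySem.Chars.count.go]
  | succ fuel ih =>
    intro l acc h
    cases l with
    | nil => simp [PySem.Chars.count.go]
    | cons x rest =>
      by_cases hx : x = c
      · subst hx
        rw [show PySem.Chars.count.go [x] (fuel+1) (x :: rest) acc
              = PySem.Chars.count.go [x] fuel rest (acc + 1) from by
            simp [PySem.Chars.count.go, List.isPrefixOf]]
        rw [ih rest _ (by simpa using h)]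
        simp
        omega
      · rw [show PySem.Chars.count.go [c] (fuel+1) (x :: rest) acc
              = PySem.Chars.count.go [c] fuel rest acc from by
            simp [PySem.Chars.count.go, List.isPrefixOf]
            intro hh; exact absurd hh.symm hx]
        rw [ih rest _ (by simpa using h)]
        simp [hx]

theorem count_char (l : List Char) (c : Char) : PySem.Chars.count l [c] = l.count c := by
  rw [PySem.Chars.count]
  simp only [List.isEmpty_cons, Bool.false_eq_true, if_false]
  rw [count_go_char c l.length l 0 le_rfl]
  omega

theorem pvBalC_counts (l : List Char) :
    pvBalC l = (l.count '(' : Int) + l.count '[' - l.count ')' - l.count ']' := by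
  induction l with
  | nil => simp [pvBalC]
  | cons c rest ih =>
    simp only [pvBalC, ih, List.count_cons]
    by_cases h1 : c = '(' <;> by_cases h2 : c = '[' <;> by_cases h3 : c = ')' <;>
      by_cases h4 : c = ']' <;> simp_all <;> ring

theorem pvSegsC_no_comma (p : List Char) : ∀ (rem2 cur : List Char) (d : Int), ',' ∉ p →
    pvSegsC (p ++ rem2) d cur = pvSegsC rem2 (d + pvBalC p) (cur ++ p) := by
  induction p with
  | nil => intro rem2 cur d _; simp [pvBalC]
  | cons c rest ih =>
    intro rem2 cur d hc
    have hcc : c ≠ ',' := fun h => hc (h ▸ List.mem_cons_self ..)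
    have hrest : ',' ∉ rest := fun h => hc (List.mem_cons_of_mem _ h)
    simp only [List.cons_append, pvSegsC, pvBalC]
    split_ifs with h1 h2 h3
    · rw [ih _ _ _ hrest]; simp; ring_nf
    · rw [ih _ _ _ hrest]; simp; ring_nf
    · exact absurd h3.1 hcc
    · rw [ih _ _ _ hrest]; simp

theorem pvSegsC_suffix (l : List Char) : ∀ (cur : List Char) (d : Int),
    (pvSegsC l d cur).2 <:+ cur ++ l := by
  induction l with
  | nil => intro cur d; simp [pvSegsC]
  | cons c rest ih =>
    intro cur d
    simp only [pvSegsC]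
    split_ifs with h1 h2 h3
    · have := ih (cur ++ [c]) (d + 1); simpa using this
    · have := ih (cur ++ [c]) (d - 1); simpa using this
    · have := ih [] 0
      simp only [List.nil_append] at this
      exact this.trans ⟨cur ++ [c], by simp⟩
    · have := ih (cur ++ [c]) d; simpa using this

theorem pvSliceMid (text : String) (pre cur rest : List Char)
    (h : text.toList = pre ++ cur ++ rest) :
    PySem.Str.strip (PySem.Str.slice text (some (pre.length : Int))
      (some ((pre.length : Int) + cur.length))) = pvF cur := by
  apply String.toList_inj.mp
  simp only [pvF, PySem.Str.toList_strip, PySem.Str.toList_slice,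
    PySem.Chars.slice_eq_listSlice, String.toList_ofList]
  congr 1
  rw [PySem.List.slice_toNat _ (by positivity) (by positivity), h, List.append_assoc]
  have : ((pre.length : Int) + cur.length).toNat - ((pre.length : Int)).toNat
      = cur.length := by omega
  rw [this, Int.toNat_natCast, List.drop_left, List.take_left]

theorem pvSliceTail (text : String) (t : List Char) (h : t <:+ text.toList) :
    PySem.Str.strip (PySem.Str.slice text
      (some ((text.toList.length : Int) - t.length)) none) = pvF t := by
  obtain ⟨u, hu⟩ := h
  apply String.toList_inj.mp
  simp only [pvF, PySem.Str.toList_strip, PySem.Str.toList_slice,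
    PySem.Chars.slice_eq_listSlice, String.toList_ofList]
  congr 1
  have hlen : text.toList.length = u.length + t.length := by rw [← hu]; simp
  rw [PySem.List.slice_from _ (by omega)]
  have : ((text.toList.length : Int) - t.length).toNat = u.length := by omega
  rw [this, ← hu, List.drop_left]

theorem pvMainA (text : String) : ∀ (rem pre cur : List Char) (parts : List String) (d : Int),
    text.toList = pre ++ cur ++ rem →
    (pvLoopA text (PySem.List.enumerate rem ((pre.length : Int) + cur.length))
        (parts, d, (pre.length : Int))).1
      = parts ++ (pvSegsC rem d cur).1.map pvF
  ∧ (pvLoopA text (PySem.List.enumerate rem ((pre.length : Int) + cur.length))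
        (parts, d, (pre.length : Int))).2.2
      = (text.toList.length : Int) - ((pvSegsC rem d cur).2.length : Int) := by
  intro rem
  induction rem with
  | nil =>
    intro pre cur parts d h
    simp only [PySem.List.enumerate_nil, pvLoopA, pvSegsC]
    constructor
    · simp
    · simp [h]
  | cons c rest ih =>
    intro pre cur parts d h
    rw [PySem.List.enumerate_cons]
    simp only [pvLoopA, pvSegsC]
    split_ifs with h1 h2 h3
    · have := ih pre (cur ++ [c]) parts (d + 1) (by simpa using h)
      simpa [add_assoc] using this
    · have := ih pre (cur ++ [c]) parts (d - 1) (by simpa using h)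
      simpa [add_assoc] using this
    · obtain ⟨rfl, rfl⟩ := h3
      have hmid := pvSliceMid text pre cur (',' :: rest) h
      have key := ih (pre ++ cur ++ [',']) []
        (parts ++ [PySem.Str.strip (PySem.Str.slice text (some (pre.length : Int))
          (some ((pre.length : Int) + cur.length)))]) 0 (by simpa using h)
      simp only [List.length_append, List.length_cons, List.length_nil] at key
      push_cast at key
      simp only [add_zero] at key
      constructor
      · rw [key.1, hmid]
        simp
      · rw [key.2]
    · have := ih pre (cur ++ [c]) parts d (by simpa using h)
      simpa [add_assoc] using this

theorem pvBal_ofList (q : List Char) : pvBal (String.ofList q) = pvBalC q := by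
  rw [pvBal, pvBalC_counts]
  simp only [PySem.Str.count_eq, String.toList_ofList]
  rw [show ("(".toList) = ['('] from rfl, show ("[".toList) = ['['] from rfl,
    show (")".toList) = [')'] from rfl, show ("]".toList) = [']'] from rfl]
  simp [count_char]

theorem pvJoinStr (pend : List (List Char)) :
    PySem.Str.strip (PySem.Str.join "," (pend.map String.ofList)) = pvF (pvJoinC pend) := by
  apply String.toList_inj.mp
  simp only [pvF, PySem.Str.toList_strip, PySem.Str.toList_join, String.toList_ofList]
  congr 1
  rw [List.map_map, show (",".toList) = [','] from rfl, PySem.Chars.join,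
    show (String.toList ∘ String.ofList) = id from by funext l; simp, List.map_id]
  exact intercalate_comma pend

theorem pvJoinC_append_singleton (pend : List (List Char)) (q : List Char) (h : pend ≠ []) :
    pvJoinC (pend ++ [q]) = pvJoinC pend ++ ',' :: q := by
  induction pend with
  | nil => exact absurd rfl h
  | cons p t ih =>
    cases t with
    | nil => rfl
    | cons p2 t2 =>
      rw [List.cons_append, pvJoinC_cons p (p2 :: t2 ++ [q]) (by simp),
        ih (by simp), pvJoinC_cons p (p2 :: t2) (by simp)]
      simp

theorem pvPendJoin (pend : List (List Char)) (q cur : List Char)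
    (h0 : pend = [] → cur = []) (h1 : pend ≠ [] → cur = pvJoinC pend ++ [',']) :
    pvJoinC (pend ++ [q]) = cur ++ q := by
  cases pend with
  | nil => rw [h0 rfl]; rfl
  | cons p t =>
    rw [pvJoinC_append_singleton _ _ (by simp), h1 (by simp)]
    simp

theorem pvPieces_cons (x : String) (r : List String) (segs pending : List String) (depth : Int) :
    pvPieces (x :: r) (segs, pending, depth)
      = if depth + pvBal x = 0 then
          pvPieces r (segs ++ [PySem.Str.strip (PySem.Str.join "," (pending ++ [x]))], [],
            depth + pvBal x)
        else pvPieces r (segs, pending ++ [x], depth + pvBal x) := rfl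

theorem pvMainB (Ps : List (List Char)) : ∀ (q : List Char) (d : Int)
    (pend : List (List Char)) (segs : List String) (cur : List Char),
    (',' ∉ q) → (∀ p ∈ Ps, ',' ∉ p) →
    (pend = [] → cur = []) → (pend ≠ [] → cur = pvJoinC pend ++ [',']) →
    pvFinB (pvPieces ((q :: Ps).map String.ofList) (segs, pend.map String.ofList, d))
      = segs ++ (pvSegsC (pvJoinC (q :: Ps)) d cur).1.map pvF
          ++ [pvF (pvSegsC (pvJoinC (q :: Ps)) d cur).2] := by
  induction Ps with
  | nil =>
    intro q d pend segs cur hq _ hp0 hp1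
    have hseg : pvSegsC (pvJoinC [q]) d cur = ([], cur ++ q) := by
      show pvSegsC q d cur = _
      have := pvSegsC_no_comma q [] cur d hq
      rw [List.append_nil] at this
      rw [this, pvSegsC]
    rw [hseg]
    have hjoin := pvJoinStr (pend ++ [q])
    rw [List.map_append, List.map_singleton, pvPendJoin pend q cur hp0 hp1] at hjoin
    simp only [List.map_cons, List.map_nil, pvPieces]
    split_ifs with hz
    · simp only [pvFinB, hjoin]
      simp
    · simp only [pvFinB, hjoin]
      simp
  | cons p2 t ih =>
    intro q d pend segs cur hq hPs hp0 hp1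
    have hp2 : ',' ∉ p2 := hPs p2 (List.mem_cons_self ..)
    have ht : ∀ p ∈ t, ',' ∉ p := fun p hp => hPs p (List.mem_cons_of_mem _ hp)
    have hJ : pvJoinC (q :: p2 :: t) = q ++ ',' :: pvJoinC (p2 :: t) :=
      pvJoinC_cons _ _ (by simp)
    have hstep : pvSegsC (pvJoinC (q :: p2 :: t)) d cur
        = pvSegsC (',' :: pvJoinC (p2 :: t)) (d + pvBalC q) (cur ++ q) := by
      rw [hJ, pvSegsC_no_comma q _ cur d hq]
    have hjoin := pvJoinStr (pend ++ [q])
    rw [List.map_append, List.map_singleton, pvPendJoin pend q cur hp0 hp1] at hjoin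
    rw [List.map_cons, pvPieces_cons, pvBal_ofList]
    split_ifs with hz
    · rw [show ((segs ++ [PySem.Str.strip (PySem.Str.join ","
          (pend.map String.ofList ++ [String.ofList q]))], ([] : List String), d + pvBalC q)
          = (segs ++ [pvF (cur ++ q)], ([] : List (List Char)).map String.ofList, d + pvBalC q)) from by
        rw [hjoin]; rfl]
      rw [ih p2 (d + pvBalC q) [] (segs ++ [pvF (cur ++ q)]) [] hp2 ht
        (fun _ => rfl) (fun hh => absurd rfl hh)]
      rw [hstep]
      simp only [pvSegsC, hz]
      simp [List.append_assoc]
    · rw [show (segs, pend.map String.ofList ++ [String.ofList q], d + pvBalC q)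
          = (segs, (pend ++ [q]).map String.ofList, d + pvBalC q) from by
        rw [List.map_append]; rfl]
      rw [ih p2 (d + pvBalC q) (pend ++ [q]) segs (pvJoinC (pend ++ [q]) ++ [','])
        hp2 ht (by simp) (fun _ => rfl)]
      rw [hstep]
      have hcomma : ¬ ((',' : Char) = '(' ∨ (',' : Char) = '[') := by decide
      have hcomma2 : ¬ ((',' : Char) = ')' ∨ (',' : Char) = ']') := by decide
      simp only [pvSegsC, hcomma, hcomma2, if_false]
      rw [if_neg (by simp [hz]), pvPendJoin pend q cur hp0 hp1]

-- ===== VERDICT (by name: the statement is the Claim_ definition above) =====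
theorem split_top_level_csv_py_spec : Claim_equal_split_top_level_csv_py := by
  intro text _
  unfold Spec_split_top_level_csv_py split_top_level_csv_py split_top_level_csv_py_alt
  dsimp only
  -- the pieces of text.split(",")
  have hpieces : (PySem.Str.split? text ",").getD []
      = (pvSplitC text.toList).map String.ofList := by
    rw [PySem.Str.split?, show (",".toList) = [','] from rfl, PySem.Chars.split?]
    simp [splitOn_comma]
  obtain ⟨q, Ps, hQP⟩ := List.exists_cons_of_ne_nil (pvSplitC_ne_nil text.toList)
  have hJ : pvJoinC (q :: Ps) = text.toList := by rw [← hQP, pvJoinC_splitC]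
  -- B's value
  have hnc := pvSplitC_no_comma text.toList
  rw [hQP] at hnc
  have hB := pvMainB Ps q 0 [] [] [] (hnc q (List.mem_cons_self ..))
    (fun p hp => hnc p (List.mem_cons_of_mem _ hp))
    (fun _ => rfl) (fun hh => absurd rfl hh)
  rw [hJ] at hB
  -- A's value
  have hA := pvMainA text text.toList [] [] [] 0 (by simp)
  simp only [List.length_nil, Nat.cast_zero, add_zero, List.nil_append] at hA
  have htail := pvSliceTail text (pvSegsC text.toList 0 []).2
    (by simpa using pvSegsC_suffix text.toList [] 0)
  rw [hpieces, hQP]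
  rw [show pvPieces ((q :: Ps).map String.ofList) ([], [], 0)
        = pvPieces ((q :: Ps).map String.ofList) ([], ([] : List (List Char)).map String.ofList, 0)
      from rfl]
  set stB := pvPieces ((q :: Ps).map String.ofList) ([], ([] : List (List Char)).map String.ofList, 0)
  have hB' : (if stB.2.1 ≠ [] then stB.1 ++ [PySem.Str.strip (PySem.Str.join "," stB.2.1)] else stB.1)
      = (pvSegsC text.toList 0 []).1.map pvF ++ [pvF (pvSegsC text.toList 0 []).2] := by
    rw [show (if stB.2.1 ≠ [] then stB.1 ++ [PySem.Str.strip (PySem.Str.join "," stB.2.1)] else stB.1)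
          = pvFinB stB from rfl, hB]
    simp
  rw [hB', hA.1, hA.2, htail, List.getLastD_concat, List.dropLast_concat]
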